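-- pv_equiv track=rewrite | github.com/xinshizheng/algorithm011-class02 | Week_09/reverse-string-ii.py | reverseStr
-- ===== SOURCE A (Python) =====
-- def reverseStr(s: str, k: int) -> str:
--     res = []
--     for i in range(0, len(s), 2*k):
--         remain_str = s[i:i+2*k]
--         remain_len = len(remain_str)
--         if remain_len < k:
--             res.append(remain_str[::-1])
--         else:
--             res.append(s[i:i+k][::-1])
--             res.append(s[i+k:i+2*k])
--     return ''.join(res)
-- ===== SOURCE B (Python) =====
-- def reverseStr(s: str, k: int) -> str:
--     out = []
--     rev = True
--     for i in range(0, len(s), k):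
--         chunk = s[i:i+k]
--         out.append(chunk[::-1] if rev else chunk)
--         rev = not rev
--     return ''.join(out)
-- ===== Notes on version B (the rewrite author's own statement) =====
-- stated objective: simpler
-- what changed: B walks the string in k-sized chunks with a toggling reverse flag instead of A's 2k-block loop with an inner reverse-first-half/keep-second-half split and a 'remaining < k' special case.
import Mathlib
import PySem

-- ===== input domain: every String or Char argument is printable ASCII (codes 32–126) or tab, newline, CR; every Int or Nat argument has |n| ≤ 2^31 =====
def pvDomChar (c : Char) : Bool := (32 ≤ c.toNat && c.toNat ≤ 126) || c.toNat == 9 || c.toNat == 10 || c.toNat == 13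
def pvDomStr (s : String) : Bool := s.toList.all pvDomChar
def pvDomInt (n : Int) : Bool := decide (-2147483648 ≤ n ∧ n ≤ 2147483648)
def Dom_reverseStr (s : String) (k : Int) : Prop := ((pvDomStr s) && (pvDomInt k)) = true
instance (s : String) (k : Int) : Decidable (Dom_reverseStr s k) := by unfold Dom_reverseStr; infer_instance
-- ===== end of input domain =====

-- B replaces A's 2k-block loop (reverse first half, keep second, special-case a short tail)
-- by a uniform k-chunk loop with a toggling reverse flag: simpler, same cost.

-- ===== PORT A =====
-- A: for i in range(0, len(s), 2*k): slice the 2k block; if it is shorter than k reverse it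
-- whole, else append s[i:i+k] reversed and s[i+k:i+2k]; ''.join at the end.
def reverseStr (s : String) (k : Int) : String :=
  String.ofList
    ((PySem.List.pyRange 0 (s.toList.length : Int) (2*k)).foldl
      (fun res i =>
        let remainStr := PySem.List.slice s.toList (some i) (some (i + 2*k))
        let remainLen : Int := remainStr.length
        if remainLen < k then
          res ++ [remainStr.reverse]
        else
          res ++ [(PySem.List.slice s.toList (some i) (some (i + k))).reverse]
              ++ [PySem.List.slice s.toList (some (i + k)) (some (i + 2*k))])
      []).flatten

-- ===== PORT B =====
-- B: for i in range(0, len(s), k): take the k-chunk, reverse it iff the toggling flag is set.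
def reverseStr_alt (s : String) (k : Int) : String :=
  String.ofList
    ((PySem.List.pyRange 0 (s.toList.length : Int) k).foldl
      (fun st i =>
        let chunk := PySem.List.slice s.toList (some i) (some (i + k))
        (st.1 ++ [if st.2 then chunk.reverse else chunk], !st.2))
      ([], true)).1.flatten

-- ===== PRECONDITION & SPEC =====
-- Pre_ excludes exactly k = 0, where Python's range(0, len(s), 2*k) raises ValueError (zero step).
def Pre_reverseStr (s : String) (k : Int) : Prop := k ≠ 0
instance (s : String) (k : Int) : Decidable (Pre_reverseStr s k) := by unfold Pre_reverseStr; infer_instance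
def pvWitness_reverseStr : String × Int := ("abcdefg", 2)

def Spec_reverseStr (s : String) (k : Int) (out : String) : Prop := out = reverseStr_alt s k
instance (s : String) (k : Int) (out : String) : Decidable (Spec_reverseStr s k out) := by unfold Spec_reverseStr; infer_instance

-- ===== CLAIM (what is proved, stated in full; the proofs are below) =====
def Claim_equal_reverseStr : Prop := ∀ (s : String) (k : Int), Dom_reverseStr s k → Pre_reverseStr s k → Spec_reverseStr s k (reverseStr s k)

-- ===== LEMMAS AND PROOFS =====
theorem pyRange_cons_of_pos {a b s : Int} (hs : 0 < s) (hab : a < b) :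
    PySem.List.pyRange a b s = a :: PySem.List.pyRange (a + s) b s := by
  rw [PySem.List.pyRange_of_pos a b hs, PySem.List.pyRange_of_pos (a+s) b hs, if_pos hab]
  have hdiv : (b - a + s - 1) / s = (b - a - 1) / s + 1 := by
    have h1 : b - a + s - 1 = (b - a - 1) + 1 * s := by ring
    rw [h1, Int.add_mul_ediv_right _ _ (by omega : s ≠ 0)]
  have hnn : 0 ≤ (b - a - 1) / s := Int.ediv_nonneg (by omega) (by omega)
  by_cases h2 : a + s < b
  · rw [if_pos h2]
    have hd2 : b - (a + s) + s - 1 = b - a - 1 := by ring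
    rw [hd2, hdiv]
    have ht : ((b - a - 1) / s + 1).toNat = ((b - a - 1) / s).toNat + 1 := by omega
    rw [ht, List.range_succ_eq_map]
    simp only [List.map_cons, List.map_map, Nat.cast_zero, mul_zero, add_zero]
    congr 1
    apply List.map_congr_left
    intro x _
    simp only [Function.comp_apply]
    push_cast
    ring
  · rw [if_neg h2]
    have hz : (b - a - 1) / s = 0 := Int.ediv_eq_zero_of_lt (by omega) (by omega)
    rw [hdiv, hz]
    simp

theorem pyRange_nil_of_pos {a b s : Int} (hs : 0 < s) (hab : b <= a) :
    PySem.List.pyRange a b s = [] := by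
  rw [PySem.List.pyRange_of_pos a b hs, if_neg (by omega)]
  simp
theorem pyRange_nil_of_neg {a b s : Int} (hs : s < 0) (hab : a ≤ b) :
    PySem.List.pyRange a b s = [] := by
  simp only [PySem.List.pyRange, if_neg (by omega : ¬ s = 0),
    if_neg (by omega : ¬ (0:Int) < s), if_neg (by omega : ¬ b < a)]
  simp

def specA (K : Nat) (hK : 0 < K) (t : List Char) : List Char :=
  if t.length < K then t.reverse
  else (t.take K).reverse ++ (t.drop K).take K ++ specA K hK (t.drop (2*K))
termination_by t.length
decreasing_by
  rename_i h
  simp only [List.length_drop]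
  omega

def specB (K : Nat) (hK : 0 < K) (t : List Char) (rev : Bool) : List Char :=
  if t = [] then []
  else (if rev then (t.take K).reverse else t.take K) ++ specB K hK (t.drop K) (!rev)
termination_by t.length
decreasing_by
  rename_i h
  have := List.length_pos_iff.mpr h
  simp only [List.length_drop]
  omega

theorem specA_eq_specB (K : Nat) (hK : 0 < K) (t : List Char) :
    specA K hK t = specB K hK t true := by
  induction hn : t.length using Nat.strong_induction_on generalizing t with
  | _ n ih =>
  subst hn
  by_cases hlt : t.length < K
  · rw [specA, if_pos hlt, specB]
    by_cases ht : t = []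
    · simp [ht]
    · rw [if_neg ht, specB, if_pos (List.drop_eq_nil_of_le (by omega)),
        List.take_of_length_le (by omega)]
      simp
  · rw [specA, if_neg hlt, specB,
      if_neg (by intro h; rw [h] at hlt; simp at hlt; omega)]
    rw [specB]
    by_cases hd : t.drop K = []
    · have hlen : t.length ≤ K := by
        have := congrArg List.length hd
        simp at this; omega
      rw [if_pos hd, specA, if_pos (by simp; omega)]
      simp [hd, List.drop_eq_nil_of_le, (by omega : t.length ≤ 2*K)]
    · rw [if_neg hd]
      simp only [Bool.not_false, Bool.not_true, List.drop_drop]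
      rw [← ih (t.drop (K + K)).length (by simp; have := List.length_pos_iff.mpr hd; simp at this; omega) _ rfl]
      have h2 : K + K = 2*K := by omega
      rw [h2, List.append_assoc]; simp

theorem foldB (cs : List Char) (k : Int) (hk : 0 < k) :
    ∀ (j : Nat) (res : List (List Char)) (rev : Bool),
    ((PySem.List.pyRange (j : Int) (cs.length : Int) k).foldl
      (fun st i =>
        let chunk := PySem.List.slice cs (some i) (some (i + k))
        (st.1 ++ [if st.2 then chunk.reverse else chunk], !st.2))
      (res, rev)).1.flatten = res.flatten ++ specB k.toNat (by omega) (cs.drop j) rev := by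
  have hkk : ((k.toNat : Int)) = k := Int.toNat_of_nonneg (by omega)
  have hK1 : 1 ≤ k.toNat := by omega
  have H : ∀ (m : Nat) (j : Nat) (res : List (List Char)) (rev : Bool), cs.length - j ≤ m →
    ((PySem.List.pyRange (j : Int) (cs.length : Int) k).foldl
      (fun st i =>
        let chunk := PySem.List.slice cs (some i) (some (i + k))
        (st.1 ++ [if st.2 then chunk.reverse else chunk], !st.2))
      (res, rev)).1.flatten = res.flatten ++ specB k.toNat (by omega) (cs.drop j) rev := by
    intro m
    induction m with
    | zero =>
      intro j res rev hle
      rw [pyRange_nil_of_pos hk (by omega), List.foldl_nil,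
        List.drop_eq_nil_of_le (by omega), specB, if_pos rfl, List.append_nil]
    | succ m ihm =>
      intro j res rev hle
      by_cases hj : j < cs.length
      · rw [pyRange_cons_of_pos hk (by exact_mod_cast hj), List.foldl_cons]
        simp only
        have hcast : (j : Int) + k = ((j + k.toNat : Nat) : Int) := by push_cast; omega
        rw [hcast, PySem.List.slice_natCast]
        have htake : List.take (j + k.toNat - j) (List.drop j cs) = List.take k.toNat (List.drop j cs) := by
          congr 1; omega
        rw [htake, ihm (j + k.toNat) _ (!rev) (by omega)]
        rw [specB.eq_def (t := List.drop j cs), if_neg (List.ne_nil_of_length_pos (by simp only [List.length_drop]; omega))]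
        simp only [List.flatten_append, List.flatten_cons, List.flatten_nil, List.append_nil,
          List.drop_drop, List.append_assoc]
      · rw [pyRange_nil_of_pos hk (by exact_mod_cast (by omega : cs.length ≤ j)), List.foldl_nil,
          List.drop_eq_nil_of_le (by omega), specB, if_pos rfl, List.append_nil]
  intro j res rev
  exact H (cs.length - j) j res rev le_rfl

theorem foldA (cs : List Char) (k : Int) (hk : 0 < k) :
    ∀ (j : Nat) (res : List (List Char)),
    ((PySem.List.pyRange (j : Int) (cs.length : Int) (2*k)).foldl
      (fun res i =>
        let remainStr := PySem.List.slice cs (some i) (some (i + 2*k))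
        let remainLen : Int := remainStr.length
        if remainLen < k then
          res ++ [remainStr.reverse]
        else
          res ++ [(PySem.List.slice cs (some i) (some (i + k))).reverse]
              ++ [PySem.List.slice cs (some (i + k)) (some (i + 2*k))])
      res).flatten = res.flatten ++ specA k.toNat (by omega) (cs.drop j) := by
  have hkk : ((k.toNat : Int)) = k := Int.toNat_of_nonneg (by omega)
  have hK1 : 1 ≤ k.toNat := by omega
  have H : ∀ (m : Nat) (j : Nat) (res : List (List Char)), cs.length - j ≤ m →
    ((PySem.List.pyRange (j : Int) (cs.length : Int) (2*k)).foldl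
      (fun res i =>
        let remainStr := PySem.List.slice cs (some i) (some (i + 2*k))
        let remainLen : Int := remainStr.length
        if remainLen < k then
          res ++ [remainStr.reverse]
        else
          res ++ [(PySem.List.slice cs (some i) (some (i + k))).reverse]
              ++ [PySem.List.slice cs (some (i + k)) (some (i + 2*k))])
      res).flatten = res.flatten ++ specA k.toNat (by omega) (cs.drop j) := by
    intro m
    induction m with
    | zero =>
      intro j res hle
      rw [pyRange_nil_of_pos (by omega) (by omega), List.foldl_nil,
        List.drop_eq_nil_of_le (by omega), specA, if_pos (by simp only [List.length_nil]; omega), List.reverse_nil,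
        List.append_nil]
    | succ m ihm =>
      intro j res hle
      by_cases hj : j < cs.length
      · rw [pyRange_cons_of_pos (by omega) (by exact_mod_cast hj), List.foldl_cons]
        simp only
        have hcast2 : (j : Int) + 2*k = ((j + 2*k.toNat : Nat) : Int) := by push_cast; omega
        have hcast1 : (j : Int) + k = ((j + k.toNat : Nat) : Int) := by push_cast; omega
        rw [hcast2, hcast1, PySem.List.slice_natCast, PySem.List.slice_natCast,
          PySem.List.slice_natCast]
        have e2 : j + 2*k.toNat - j = 2*k.toNat := by omega
        have e1 : j + k.toNat - j = k.toNat := by omega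
        have e3 : j + 2*k.toNat - (j + k.toNat) = k.toNat := by omega
        rw [e2, e1, e3]
        set t := List.drop j cs with ht
        have hlt : t.length = cs.length - j := by rw [ht]; simp
        by_cases hshort : t.length < k.toNat
        · rw [if_pos (by
            simp only [List.length_take]
            rw [← hkk]; exact_mod_cast (by omega : min (2*k.toNat) t.length < k.toNat))]
          rw [pyRange_nil_of_pos (by omega) (by push_cast; omega), List.foldl_nil]
          rw [List.take_of_length_le (by omega), specA, if_pos hshort]
          simp [List.flatten_append]
        · rw [if_neg (by
            simp only [List.length_take]
            rw [← hkk]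
            exact_mod_cast (by omega : ¬ (min (2*k.toNat) t.length < k.toNat)))]
          rw [ihm (j + 2*k.toNat) _ (by omega)]
          rw [specA.eq_def (t := t), if_neg hshort]
          have hdd : List.drop (j + k.toNat) cs = t.drop k.toNat := by
            rw [ht, List.drop_drop]
          have hdd2 : List.drop (j + 2*k.toNat) cs = t.drop (2*k.toNat) := by
            rw [ht, List.drop_drop]
          rw [hdd, hdd2]
          simp [List.flatten_append, List.append_assoc]
      · rw [pyRange_nil_of_pos (by omega) (by exact_mod_cast (by omega : cs.length ≤ j)),
          List.foldl_nil, List.drop_eq_nil_of_le (by omega), specA,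
          if_pos (by simp only [List.length_nil]; omega), List.reverse_nil, List.append_nil]
  intro j res
  exact H (cs.length - j) j res le_rfl

-- ===== VERDICT (by name: the statement is the Claim_ definition above) =====
theorem reverseStr_spec : Claim_equal_reverseStr := by
  intro s k _ hk
  unfold Spec_reverseStr reverseStr reverseStr_alt
  rcases lt_trichotomy k 0 with h | h | h
  · rw [pyRange_nil_of_neg (by omega : 2*k < 0) (by omega),
        pyRange_nil_of_neg h (by omega)]
    rfl
  · exact absurd h hk
  · have hA := foldA s.toList k h 0 []
    have hB := foldB s.toList k h 0 ([] : List (List Char)) true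
    simp only [Nat.cast_zero, List.drop_zero] at hA hB
    rw [hA, hB, specA_eq_specB k.toNat (by omega) s.toList]
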